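-- pv_equiv track=rewrite | github.com/guzhoudiaoke/data_structure_and_algorithms | coding_interview_guide/5_string/3/3.py | remove_k_zeros1
-- ===== SOURCE A (Python) =====
-- def remove_k_zeros1(s, k):
--     def remove(chars, start, count):
--         while count:
--             chars[start] = None
--             start += 1
--             count -= 1
--
--     if s is None or k < 1:
--         return s
--
--     chars = list(s)
--     start, count = -1, 0
--     for i in range(len(chars)):
--         if chars[i] == '0':
--             count += 1
--             start = i if start == -1 else start
--         else:
--             if count == k:
--                 remove(chars, start, count)
--             start, count = -1, 0
--
--     if count == k:
--         remove(chars, start, count)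
--
--     return ''.join([c for c in chars if c])
-- ===== SOURCE B (Python) =====
-- def remove_k_zeros1(s, k):
--     if s is None or k < 1:
--         return s
--     # left[i]: length of the zero-run ending at i; right[i]: length of the zero-run
--     # starting at i.  A zero at i belongs to a maximal run of length left[i]+right[i]-1,
--     # so it is dropped exactly when that sum equals k.
--     left = []
--     run = 0
--     for c in s:
--         run = run + 1 if c == '0' else 0
--         left.append(run)
--     right = []
--     run = 0
--     for c in reversed(s):
--         run = run + 1 if c == '0' else 0
--         right.append(run)
--     right.reverse()
--     return ''.join(c for c, l, r in zip(s, left, right)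
--                    if not (c == '0' and l + r - 1 == k))
-- ===== Notes on version B (the rewrite author's own statement) =====
-- stated objective: alternative
-- what changed: Replaces A's single-pass run tracking with in-place None-marking by a per-character membership test: two DP passes compute, for every position, the length of the zero-run ending and starting there, and a character is kept unless it is a '0' whose maximal run (left+right-1) has length exactly k.
import Mathlib
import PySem

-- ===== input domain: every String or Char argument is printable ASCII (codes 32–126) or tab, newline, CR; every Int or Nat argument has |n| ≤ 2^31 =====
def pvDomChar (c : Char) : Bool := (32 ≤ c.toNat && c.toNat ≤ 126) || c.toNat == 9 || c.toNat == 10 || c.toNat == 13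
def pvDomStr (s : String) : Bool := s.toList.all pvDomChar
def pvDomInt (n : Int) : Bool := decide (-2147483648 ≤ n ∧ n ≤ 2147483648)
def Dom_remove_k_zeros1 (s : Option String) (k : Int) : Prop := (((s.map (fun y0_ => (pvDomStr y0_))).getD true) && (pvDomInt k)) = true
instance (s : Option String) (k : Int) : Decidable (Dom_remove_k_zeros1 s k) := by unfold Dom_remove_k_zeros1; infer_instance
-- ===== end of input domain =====

-- Re-implementation B: two DP passes (zero-run length ending / starting at each position)
-- and a per-character keep test, instead of A's sentinel run tracking + in-place None-marking.


-- ===== PORT A =====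

-- `chars[start] = None`: Python list assignment (negative index wraps; out of range would
-- raise, but A only ever writes in range, so the in-range behaviour is what matters).
def pySet (xs : List (Option Char)) (i : Int) (v : Option Char) : List (Option Char) :=
  let j : Int := if i < 0 then i + xs.length else i
  xs.set j.toNat v

-- `while count: chars[start] = None; start += 1; count -= 1` — A only calls this with
-- count ≥ 0, where the loop runs exactly count times; count.toNat is that trip count.
def pyRemoveAux (chars : List (Option Char)) (start : Int) : Nat → List (Option Char)
  | 0 => chars
  | n + 1 => pyRemoveAux (pySet chars start none) (start + 1) n

def pyRemove (chars : List (Option Char)) (start count : Int) : List (Option Char) :=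
  pyRemoveAux chars start count.toNat

-- one iteration of A's for-loop body; state = (chars, start, count)
def astep (k : Int) (st : List (Option Char) × Int × Int) (i : Nat) :
    List (Option Char) × Int × Int :=
  let (chars, start, count) := st
  if chars.getD i none == some '0' then
    (chars, (if start == -1 then (i : Int) else start), count + 1)
  else
    (if count == k then pyRemove chars start count else chars, -1, 0)

def remove_k_zeros1 (s : Option String) (k : Int) : Option String :=
  match s with
  | none => none                         -- `if s is None ...: return s`
  | some str =>
    if k < 1 then some str               -- `... or k < 1: return s`
    else
      let chars : List (Option Char) := str.toList.map some   -- list(s); cells may become None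
      let st := (List.range chars.length).foldl (astep k) (chars, -1, 0)
      let chars' := if st.2.2 == k then pyRemove st.1 st.2.1 st.2.2 else st.1
      some (String.mk (chars'.filterMap id))   -- ''.join([c for c in chars if c])

-- ===== PORT B =====

-- one iteration of B's run-length scan: `run = run + 1 if c == '0' else 0; acc.append(run)`
def runScanLoop (st : List Int × Int) (c : Char) : List Int × Int :=
  let run : Int := if c == '0' then st.2 + 1 else 0
  (st.1 ++ [run], run)

def runScan (cs : List Char) : List Int := (cs.foldl runScanLoop ([], 0)).1

def remove_k_zeros1_alt (s : Option String) (k : Int) : Option String :=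
  match s with
  | none => none
  | some str =>
    if k < 1 then some str
    else
      let cs := str.toList
      let left := runScan cs                       -- zero-run length ending at i
      let right := (runScan cs.reverse).reverse    -- zero-run length starting at i
      -- ''.join(c for c, l, r in zip(s, left, right) if not (c == '0' and l + r - 1 == k))
      some (String.mk ((cs.zip (left.zip right)).filterMap
        (fun p => if p.1 == '0' && (p.2.1 + p.2.2 - 1 == k) then none else some p.1)))

-- ===== PRECONDITION & SPEC =====
def Spec_remove_k_zeros1 (s : Option String) (k : Int) (out : Option String) : Prop := out = remove_k_zeros1_alt s k
instance (s : Option String) (k : Int) (out : Option String) : Decidable (Spec_remove_k_zeros1 s k out) := by unfold Spec_remove_k_zeros1; infer_instance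

-- ===== CLAIM (what is proved, stated in full; the proofs are below) =====
def Claim_equal_remove_k_zeros1 : Prop := ∀ (s : Option String) (k : Int), Dom_remove_k_zeros1 s k → Spec_remove_k_zeros1 s k (remove_k_zeros1 s k)

-- ===== LEMMAS AND PROOFS =====

-- common reference semantics: a run-scan over the string, dropping '0'-runs of length k
def modelLoop (k : Int) (out : List Char) (zrun : Nat) : List Char → List Char
  | [] => out ++ (if (zrun : Int) = k then [] else List.replicate zrun '0')
  | c :: rest =>
    if c = '0' then modelLoop k out (zrun + 1) rest
    else modelLoop k (out ++ (if (zrun : Int) = k then [] else List.replicate zrun '0') ++ [c]) 0 rest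

def finishA (k : Int) (st : List (Option Char) × Int × Int) : List Char :=
  (if st.2.2 == k then pyRemove st.1 st.2.1 st.2.2 else st.1).filterMap id

lemma pySet_mid (pre : List (Option Char)) (x : Option Char) (rest : List (Option Char))
    (v : Option Char) : pySet (pre ++ x :: rest) (pre.length) v = pre ++ v :: rest := by
  simp only [pySet]
  rw [if_neg (by omega)]
  simp

lemma pyRemoveAux_mid : ∀ (n : Nat) (pre rest : List (Option Char)),
    pyRemoveAux (pre ++ List.replicate n (some '0') ++ rest) (pre.length) n
      = pre ++ List.replicate n none ++ rest := by
  intro n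
  induction n with
  | zero => intro pre rest; simp [pyRemoveAux]
  | succ m ih =>
    intro pre rest
    have h1 : pre ++ List.replicate (m + 1) (some '0') ++ rest
        = pre ++ some '0' :: (List.replicate m (some '0') ++ rest) := by
      simp [List.replicate_succ]
    rw [h1, pyRemoveAux, pySet_mid]
    have h2 : pre ++ none :: (List.replicate m (some '0') ++ rest)
        = (pre ++ [none]) ++ List.replicate m (some '0') ++ rest := by simp
    have h3 : (pre.length : Int) + 1 = ((pre ++ [none]).length : Int) := by simp
    rw [h2, h3, ih (pre ++ [none]) rest]
    simp [List.replicate_succ]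

lemma getD_append_len (l₁ : List (Option Char)) (x : Option Char) (l₂ : List (Option Char)) :
    (l₁ ++ x :: l₂).getD l₁.length none = x := by
  induction l₁ with
  | nil => simp
  | cons a t ih => simpa using ih

lemma filterMap_id_replicate_some (n : Nat) (c : Char) :
    (List.replicate n (some c)).filterMap id = List.replicate n c := by
  induction n with
  | zero => simp
  | succ m ih => simp [List.replicate_succ, ih]

lemma filterMap_id_replicate_none (n : Nat) :
    (List.replicate n (none : Option Char)).filterMap id = [] := by
  induction n with
  | zero => simp
  | succ m ih => simp [List.replicate_succ, ih]

lemma loopA_eq (k : Int) : ∀ (todo : List Char) (accM : List (Option Char)) (zrun : Nat),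
    finishA k ((List.range' (accM.length + zrun) todo.length).foldl (astep k)
        (accM ++ List.replicate zrun (some '0') ++ todo.map some,
         (if zrun = 0 then (-1 : Int) else (accM.length : Int)), (zrun : Int)))
      = modelLoop k (accM.filterMap id) zrun todo := by
  intro todo
  induction todo with
  | nil =>
    intro accM zrun
    simp only [List.map_nil, List.length_nil, List.range'_zero, List.foldl_nil, finishA,
      modelLoop, List.append_nil]
    by_cases hk : (zrun : Int) = k
    · rcases Nat.eq_zero_or_pos zrun with h0 | hpos
      · subst h0
        simp [hk, pyRemove, pyRemoveAux]
      · rw [if_neg (Nat.pos_iff_ne_zero.mp hpos), ← hk]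
        simp only [beq_self_eq_true, if_true, pyRemove, Int.toNat_natCast]
        have hmid : pyRemoveAux (accM ++ List.replicate zrun (some '0')) (accM.length) zrun
            = accM ++ List.replicate zrun none := by
          simpa using pyRemoveAux_mid zrun accM []
        rw [hmid]
        simp [List.filterMap_append, filterMap_id_replicate_none]
    · have hbeq : ((zrun : Int) == k) = false := by simpa using hk
      simp [hbeq, hk, List.filterMap_append, filterMap_id_replicate_some]
  | cons c rest ih =>
    intro accM zrun
    rw [List.length_cons, List.range'_succ, List.foldl_cons]
    have hget : (accM ++ List.replicate zrun (some '0') ++ (c :: rest).map some).getD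
        (accM.length + zrun) none = some c := by
      have h : accM ++ List.replicate zrun (some '0') ++ (c :: rest).map some
          = (accM ++ List.replicate zrun (some '0')) ++ some c :: rest.map some := by simp
      rw [h]
      have hlen : (accM ++ List.replicate zrun (some '0')).length = accM.length + zrun := by simp
      rw [← hlen]
      exact getD_append_len _ _ _
    by_cases hc : c = '0'
    · subst hc
      have hstep : astep k (accM ++ List.replicate zrun (some '0') ++ ('0' :: rest).map some,
            (if zrun = 0 then (-1 : Int) else (accM.length : Int)), (zrun : Int))
            (accM.length + zrun)
          = (accM ++ List.replicate (zrun + 1) (some '0') ++ rest.map some,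
             (accM.length : Int), ((zrun + 1 : Nat) : Int)) := by
        simp only [astep, hget, beq_self_eq_true, if_true, Prod.mk.injEq]
        refine ⟨?_, ?_, ?_⟩
        · simp [List.replicate_succ' (n := zrun)]
        · rcases Nat.eq_zero_or_pos zrun with h0 | hpos
          · subst h0; simp
          · have h1 : zrun ≠ 0 := Nat.pos_iff_ne_zero.mp hpos
            have h2 : ((accM.length : Int) == -1) = false := by
              simp only [beq_eq_false_iff_ne, ne_eq]
              omega
            simp [h1, h2]
        · push_cast; ring
      rw [hstep]
      have harr : accM.length + zrun + 1 = accM.length + (zrun + 1) := by omega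
      have hstart : (accM.length : Int)
          = (if zrun + 1 = 0 then (-1 : Int) else (accM.length : Int)) := by simp
      rw [harr, hstart, ih accM (zrun + 1)]
      simp [modelLoop]
    · have hgetne : ((accM ++ List.replicate zrun (some '0') ++ (c :: rest).map some).getD
          (accM.length + zrun) none == some '0') = false := by
        rw [hget]; simpa using hc
      by_cases hk : (zrun : Int) = k
      · have hbeq : ((zrun : Int) == k) = true := by simpa using hk
        rcases Nat.eq_zero_or_pos zrun with h0 | hpos
        · subst h0
          have hstep : astep k (accM ++ List.replicate 0 (some '0') ++ (c :: rest).map some,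
                (if (0 : Nat) = 0 then (-1 : Int) else (accM.length : Int)), ((0 : Nat) : Int))
                (accM.length + 0)
              = ((accM ++ [some c]) ++ List.replicate 0 (some '0') ++ rest.map some, -1, 0) := by
            simp only [astep, hgetne]
            simp [pyRemove, pyRemoveAux]
          rw [hstep, show accM.length + 0 + 1 = (accM ++ [some c]).length + 0 by simp,
            show (-1 : Int) = (if (0:Nat) = 0 then (-1:Int) else (((accM ++ [some c]).length : Nat) : Int)) by simp,
            show (0 : Int) = ((0:Nat) : Int) by simp, ih (accM ++ [some c]) 0]
          simp [modelLoop, hc, hk, List.filterMap_append]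
        · have h1 : zrun ≠ 0 := Nat.pos_iff_ne_zero.mp hpos
          have hstep : astep k (accM ++ List.replicate zrun (some '0') ++ (c :: rest).map some,
                (if zrun = 0 then (-1 : Int) else (accM.length : Int)), (zrun : Int))
                (accM.length + zrun)
              = ((accM ++ List.replicate zrun none ++ [some c])
                  ++ List.replicate 0 (some '0') ++ rest.map some, -1, 0) := by
            simp only [astep, hgetne, h1, if_false, hbeq, if_true, Bool.false_eq_true]
            have hform : accM ++ List.replicate zrun (some '0') ++ (c :: rest).map some
                = accM ++ List.replicate zrun (some '0') ++ (some c :: rest.map some) := by simp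
            rw [hform, pyRemove, Int.toNat_natCast, pyRemoveAux_mid zrun accM (some c :: rest.map some)]
            simp
          rw [hstep, show accM.length + zrun + 1
              = (accM ++ List.replicate zrun none ++ [some c]).length + 0 by simp; omega,
            show (-1 : Int) = (if (0:Nat) = 0 then (-1:Int) else (((accM ++ List.replicate zrun none ++ [some c]).length : Nat) : Int)) by simp,
            show (0 : Int) = ((0:Nat) : Int) by simp, ih (accM ++ List.replicate zrun none ++ [some c]) 0]
          simp [modelLoop, hc, hk, List.filterMap_append, filterMap_id_replicate_none]
      · have hbeq : ((zrun : Int) == k) = false := by simpa using hk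
        have hstep : astep k (accM ++ List.replicate zrun (some '0') ++ (c :: rest).map some,
              (if zrun = 0 then (-1 : Int) else (accM.length : Int)), (zrun : Int))
              (accM.length + zrun)
            = ((accM ++ List.replicate zrun (some '0') ++ [some c])
                ++ List.replicate 0 (some '0') ++ rest.map some, -1, 0) := by
          simp only [astep, hgetne, hbeq, if_false, Bool.false_eq_true]
          simp
        rw [hstep, show accM.length + zrun + 1
            = (accM ++ List.replicate zrun (some '0') ++ [some c]).length + 0 by simp; omega,
          show (-1 : Int) = (if (0:Nat) = 0 then (-1:Int) else (((accM ++ List.replicate zrun (some '0') ++ [some c]).length : Nat) : Int)) by simp,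
          show (0 : Int) = ((0:Nat) : Int) by simp, ih (accM ++ List.replicate zrun (some '0') ++ [some c]) 0]
        simp [modelLoop, hc, hk, List.filterMap_append, filterMap_id_replicate_some]

-- ------------------------- B side -------------------------

-- recursive form of B's run-length scan
def rsa : List Char → Int → List Int
  | [], _ => []
  | c :: r, a => (if c = '0' then a + 1 else 0) :: rsa r (if c = '0' then a + 1 else 0)

-- accumulator after scanning a list
def accA : List Char → Int → Int
  | [], a => a
  | c :: r, a => accA r (if c = '0' then a + 1 else 0)

lemma runScan_foldl_eq : ∀ (cs : List Char) (pre : List Int) (a : Int),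
    (cs.foldl runScanLoop (pre, a)).1 = pre ++ rsa cs a := by
  intro cs
  induction cs with
  | nil => intro pre a; simp [rsa]
  | cons c r ih =>
    intro pre a
    by_cases hc : c = '0' <;>
      simp [runScanLoop, rsa, hc, ih]

lemma runScan_eq_rsa (cs : List Char) : runScan cs = rsa cs 0 := by
  simpa using runScan_foldl_eq cs [] 0

lemma rsa_append : ∀ (xs ys : List Char) (a : Int),
    rsa (xs ++ ys) a = rsa xs a ++ rsa ys (accA xs a) := by
  intro xs
  induction xs with
  | nil => intro ys a; simp [rsa, accA]
  | cons c r ih => intro ys a; simp [rsa, accA, ih]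

lemma rsa_head_ne (ys : List Char) (a : Int)
    (h : ys = [] ∨ ∃ c t, ys = c :: t ∧ c ≠ '0') : rsa ys a = rsa ys 0 := by
  rcases h with h | ⟨c, t, rfl, hc⟩
  · subst h; rfl
  · simp [rsa, hc]

lemma accA_append_one (xs : List Char) (c : Char) (a : Int) :
    accA (xs ++ [c]) a = if c = '0' then accA xs a + 1 else 0 := by
  induction xs generalizing a with
  | nil => simp [accA]
  | cons d r ih => simp [accA, ih]

lemma rsa_zeros : ∀ (m : Nat) (a : Int),
    rsa (List.replicate m '0') a = (List.range m).map (fun i : Nat => a + (i : Int) + 1) := by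
  intro m
  induction m with
  | zero => intro a; simp [rsa]
  | succ n ih =>
    intro a
    rw [List.replicate_succ, List.range_succ_eq_map, List.map_cons, List.map_map]
    simp only [rsa, if_true, ih (a + 1)]
    congr 1
    · push_cast; ring
    · congr 1
      funext i
      simp only [Function.comp]
      push_cast
      ring

-- B's kept characters, on the recursive scan form
def bKeep (k : Int) (cs : List Char) : List Char :=
  (cs.zip ((rsa cs 0).zip ((rsa cs.reverse 0).reverse))).filterMap
    (fun p => if p.1 == '0' && (p.2.1 + p.2.2 - 1 == k) then none else some p.1)

lemma bKeep_cons_ne (k : Int) (c : Char) (r : List Char) (hc : c ≠ '0') :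
    bKeep k (c :: r) = c :: bKeep k r := by
  unfold bKeep
  have h1 : rsa (c :: r) 0 = 0 :: rsa r 0 := by simp [rsa, hc]
  have h2 : rsa ((c :: r).reverse) 0 = rsa r.reverse 0 ++ [0] := by
    rw [List.reverse_cons, rsa_append]
    simp [rsa, hc]
  rw [h1, h2, List.reverse_append]
  simp only [List.reverse_singleton, List.singleton_append, List.zip_cons_cons,
    List.filterMap_cons]
  have hcb : (c == '0') = false := by simpa using hc
  simp [hcb]

lemma zip_reverse_range (m : Nat) :
    ((List.range m).map (fun i : Nat => (0:Int) + (i : Int) + 1)).reverse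
      = (List.range m).map (fun i : Nat => (m : Int) - (i : Int)) := by
  apply List.ext_getElem
  · simp
  · intro i h1 h2
    simp only [List.getElem_reverse, List.getElem_map, List.getElem_range,
      List.length_map, List.length_range]
    have hi : i < m := by simpa using h2
    omega

lemma bKeep_zeros (k : Int) (m : Nat) (rest : List Char)
    (h : rest = [] ∨ ∃ c t, rest = c :: t ∧ c ≠ '0') :
    bKeep k (List.replicate m '0' ++ rest)
      = (if (m : Int) = k then [] else List.replicate m '0') ++ bKeep k rest := by
  unfold bKeep
  have hacc0 : accA (List.replicate m '0') 0 = (m : Int) := by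
    induction m with
    | zero => simp [accA]
    | succ n ih =>
      -- accA over '0'-replicate just counts; redo by a small generalized fact
      clear ih
      have gen : ∀ (n : Nat) (a : Int), accA (List.replicate n '0') a = a + n := by
        intro n
        induction n with
        | zero => intro a; simp [accA]
        | succ p ihp => intro a; rw [List.replicate_succ]; simp [accA, ihp]; ring
      simpa using gen (n + 1) 0
  have haccRest : accA rest.reverse 0 = 0 := by
    rcases h with hr | ⟨c, t, rfl, hc⟩
    · subst hr; simp [accA]
    · rw [List.reverse_cons, accA_append_one]; simp [hc]
  -- left list
  have hleft : rsa (List.replicate m '0' ++ rest) 0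
      = (List.range m).map (fun i : Nat => (0:Int) + (i : Int) + 1) ++ rsa rest 0 := by
    rw [rsa_append, rsa_zeros, hacc0, rsa_head_ne rest _ h]
  -- right list
  have hright : (rsa ((List.replicate m '0' ++ rest).reverse) 0).reverse
      = (List.range m).map (fun i : Nat => (m : Int) - (i : Int)) ++ (rsa rest.reverse 0).reverse := by
    rw [List.reverse_append, List.reverse_replicate, rsa_append, haccRest, rsa_zeros,
      List.reverse_append, zip_reverse_range m]
  rw [hleft, hright]
  have hlen1 : ((List.range m).map (fun i : Nat => (0:Int) + (i : Int) + 1)).length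
      = ((List.range m).map (fun i : Nat => (m : Int) - (i : Int))).length := by simp
  rw [List.zip_append hlen1]
  have hlen2 : (List.replicate m '0').length
      = (((List.range m).map (fun i : Nat => (0:Int) + (i : Int) + 1)).zip
          ((List.range m).map (fun i : Nat => (m : Int) - (i : Int)))).length := by
    simp [List.length_zip]
  rw [List.zip_append hlen2, List.filterMap_append]
  congr 1
  -- block part
  have hblock : (List.replicate m '0').zip
      (((List.range m).map (fun i : Nat => (0:Int) + (i : Int) + 1)).zip
        ((List.range m).map (fun i : Nat => (m : Int) - (i : Int))))
      = (List.range m).map (fun i : Nat => ('0', ((0:Int) + (i : Int) + 1, (m : Int) - (i : Int)))) := by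
    have hrep : List.replicate m '0' = (List.range m).map (fun _ => '0') := by
      simp [List.map_const']
    rw [hrep, List.zip_map', List.zip_map']
  rw [hblock, List.filterMap_map]
  have hfun : ((fun p => if p.1 == '0' && (p.2.1 + p.2.2 - 1 == k) then none else some p.1) ∘
      (fun i : Nat => ('0', ((0:Int) + (i : Int) + 1, (m : Int) - (i : Int)))))
      = fun i : Nat => if (m : Int) = k then (none : Option Char) else some '0' := by
    funext i
    simp only [Function.comp]
    have harith : (0:Int) + (i : Int) + 1 + ((m : Int) - (i : Int)) - 1 = (m : Int) := by ring
    rw [harith]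
    by_cases hmk : (m : Int) = k
    · simp [hmk]
    · have : (((m : Int)) == k) = false := by simpa using hmk
      simp [this, hmk]
  rw [hfun]
  by_cases hmk : (m : Int) = k
  · simp [hmk]
  · simp only [hmk, if_false]
    rw [show (fun (_ : Nat) => some '0') = some ∘ (fun (_ : Nat) => '0') from rfl,
      List.filterMap_eq_map, List.map_const', List.length_range]

lemma modelLoop_out (k : Int) : ∀ (cs : List Char) (out : List Char) (z : Nat),
    modelLoop k out z cs = out ++ modelLoop k [] z cs := by
  intro cs
  induction cs with
  | nil => intro out z; simp [modelLoop]
  | cons c r ih =>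
    intro out z
    by_cases hc : c = '0'
    · simp only [modelLoop, hc, if_true]
      exact ih out (z + 1)
    · simp only [modelLoop, hc, if_false]
      rw [ih (out ++ (if (z : Int) = k then [] else List.replicate z '0') ++ [c]) 0,
        ih (([] : List Char) ++ (if (z : Int) = k then [] else List.replicate z '0') ++ [c]) 0]
      simp

lemma modelLoop_zeros (k : Int) : ∀ (m : Nat) (z : Nat) (rest : List Char),
    modelLoop k [] z (List.replicate m '0' ++ rest) = modelLoop k [] (z + m) rest := by
  intro m
  induction m with
  | zero => intro z rest; simp
  | succ n ih =>
    intro z rest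
    rw [List.replicate_succ, List.cons_append]
    simp only [modelLoop, if_true]
    rw [ih (z + 1) rest, show z + 1 + n = z + (n + 1) by omega]

lemma bKeep_eq_model (k : Int) : ∀ (n : Nat) (cs : List Char), cs.length ≤ n →
    bKeep k cs = modelLoop k [] 0 cs := by
  intro n
  induction n with
  | zero =>
    intro cs h
    match cs with
    | [] => simp [bKeep, rsa, modelLoop]
    | c :: r => simp at h
  | succ n ih =>
    intro cs hlen
    match hcs : cs with
    | [] => simp [bKeep, rsa, modelLoop]
    | c :: r =>
      by_cases hc : c = '0'
      · -- leading zero block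
        subst hc
        obtain ⟨m, rest, hdecomp, hmpos, hhead⟩ :
            ∃ m rest, '0' :: r = List.replicate m '0' ++ rest ∧ 1 ≤ m ∧
              (rest = [] ∨ ∃ d t, rest = d :: t ∧ d ≠ '0') := by
          refine ⟨(('0' :: r).takeWhile (fun x => x == '0')).length,
            ('0' :: r).dropWhile (fun x => x == '0'), ?_, ?_, ?_⟩
          · conv_lhs => rw [← List.takeWhile_append_dropWhile (p := fun x => x == '0') (l := '0' :: r)]
            congr 1
            apply List.eq_replicate_of_mem
            intro b hb
            simpa using List.mem_takeWhile_imp hb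
          · rw [List.takeWhile_cons]
            simp
          · cases hr : ('0' :: r).dropWhile (fun x => x == '0') with
            | nil => exact Or.inl rfl
            | cons d t =>
              refine Or.inr ⟨d, t, rfl, ?_⟩
              have h := List.head?_dropWhile_not (fun x => x == '0') ('0' :: r)
              rw [hr] at h
              simpa using h
        have hlrest : rest.length ≤ n := by
          have h1 : ('0' :: r).length = m + rest.length := by
            rw [hdecomp]; simp
          have h2 : ('0' :: r).length ≤ n + 1 := hlen
          omega
        rw [hdecomp, bKeep_zeros k m rest hhead, modelLoop_zeros k m 0 rest,
          ih rest hlrest]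
        rcases hhead with hr | ⟨d, t, hr, hd⟩
        · subst hr
          simp [modelLoop]
        · subst hr
          simp only [modelLoop, hd, if_false, Nat.zero_add]
          rw [modelLoop_out k t, modelLoop_out k t (([] : List Char) ++ _ ++ [d])]
          simp
      · -- nonzero head
        have hlr : r.length ≤ n := by
          have h := hlen
          simp at h
          omega
        rw [bKeep_cons_ne k c r hc, ih r hlr]
        simp only [modelLoop, hc, if_false]
        rw [modelLoop_out k r (([] : List Char) ++ _ ++ [c])]
        simp

-- ===== VERDICT (by name: the statement is the Claim_ definition above) =====
theorem remove_k_zeros1_spec : Claim_equal_remove_k_zeros1 := by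
  intro s k _
  unfold Spec_remove_k_zeros1 remove_k_zeros1 remove_k_zeros1_alt
  match s with
  | none => rfl
  | some str =>
    by_cases hk : k < 1
    · simp [hk]
    · simp only [hk, if_false]
      congr 1
      congr 1
      -- A side: reduce to modelLoop
      have hA : (List.range (str.toList.map some).length)
          = List.range' (([] : List (Option Char)).length + 0) str.toList.length := by
        simp [List.range_eq_range']
      rw [hA,
        show str.toList.map some
          = [] ++ List.replicate 0 (some '0') ++ str.toList.map some by simp,
        show (-1 : Int) = (if (0:Nat) = 0 then (-1:Int) else ((([] : List (Option Char)).length : Nat) : Int)) by simp,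
        show (0 : Int) = ((0:Nat) : Int) by simp]
      have hAres := loopA_eq k str.toList [] 0
      unfold finishA at hAres
      rw [hAres]
      -- B side: reduce to bKeep, then to modelLoop
      rw [show runScan str.toList = rsa str.toList 0 from runScan_eq_rsa _,
        show runScan str.toList.reverse = rsa str.toList.reverse 0 from runScan_eq_rsa _]
      rw [show (str.toList.zip ((rsa str.toList 0).zip ((rsa str.toList.reverse 0).reverse))).filterMap
            (fun p => if p.1 == '0' && (p.2.1 + p.2.2 - 1 == k) then none else some p.1)
          = bKeep k str.toList from rfl]
      rw [bKeep_eq_model k str.toList.length str.toList (le_refl _)]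
      simp [modelLoop]
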